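-- pv_equiv track=rewrite | github.com/bhaumikmaan/Credit-Suisse-GCC-2021-Solutions | D. Pair of Candlesticks/Solution.py | totalPairs
-- ===== SOURCE A (Python) =====
-- def totalPairs(n, values):
--     # Participants code will be here
--     no_of_pairs = 0
--     length = len(values)-1
--
--     for index in range(length):
--         for index2 in range(length, index+1, -1):
--             if max(values[index+1:index2]) < values[index] and max(values[index+1:index2]) < values[index2]:
--                 no_of_pairs += 1
--             else:
--                 pass
--     no_of_pairs += length
--     return no_of_pairs
-- ===== SOURCE B (Python) =====
-- def totalPairs(n, values):
--     # One pass per left endpoint with a running strip-maximum and early break,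
--     # instead of recomputing max() over a slice for every pair: O(n^2) vs O(n^3).
--     total = 0
--     size = len(values)
--     for i in range(size - 1):
--         total += 1              # the adjacent pair (i, i+1) is always counted
--         m = values[i + 1]       # running max of the strip values[i+1 .. j-1]
--         for j in range(i + 2, size):
--             if m >= values[i]:
--                 break           # the strip max only grows: no further pair for this i
--             if m < values[j]:
--                 total += 1
--             m = max(m, values[j])
--     return total
-- ===== Notes on version B (the rewrite author's own statement) =====
-- stated objective: faster
-- what changed: B replaces A's recomputation of max() over a fresh slice for every candidate pair (plus a bulk '+= n-1' for adjacent pairs) by a single left-to-right scan per left endpoint that maintains one running strip-maximum and breaks as soon as it reaches the left value, counting adjacent pairs inline.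
-- intended difference: On the empty list A returns -1 (it adds len(values)-1 = -1 to a zero pair count), an impossible pair count; B returns the intended 0. — e.g. on totalPairs(0, []): A returns -1, B returns 0
import Mathlib
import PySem

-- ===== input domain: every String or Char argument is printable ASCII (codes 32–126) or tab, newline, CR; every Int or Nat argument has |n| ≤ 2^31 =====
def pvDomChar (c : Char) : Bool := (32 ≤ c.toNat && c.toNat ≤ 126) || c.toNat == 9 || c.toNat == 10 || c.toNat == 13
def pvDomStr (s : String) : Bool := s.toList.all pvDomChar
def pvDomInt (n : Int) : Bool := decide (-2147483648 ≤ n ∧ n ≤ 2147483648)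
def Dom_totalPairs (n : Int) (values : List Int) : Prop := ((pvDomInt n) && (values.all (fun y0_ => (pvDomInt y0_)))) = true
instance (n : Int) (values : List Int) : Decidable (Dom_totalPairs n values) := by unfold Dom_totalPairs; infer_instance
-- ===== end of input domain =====

-- B replaces A's per-pair slice max() (O(n^3)) by one running strip-maximum per left
-- endpoint with an early break: O(n^2), measurably faster.

-- ===== PORT A =====
def totalPairs (n : Int) (values : List Int) : Int :=
  let length : Int := (values.length : Int) - 1
  let no_of_pairs : Int :=
    (PySem.List.pyRange 0 length 1).foldl (fun acc index =>
      (PySem.List.pyRange length (index + 1) (-1)).foldl (fun acc2 index2 =>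
        match PySem.List.max? (PySem.List.slice values (some (index + 1)) (some index2)) (fun y => y) with
        | some m =>
            if m < PySem.List.pyGetD values index 0 ∧ m < PySem.List.pyGetD values index2 0
            then acc2 + 1 else acc2
        | none => acc2) acc) 0
  no_of_pairs + length

-- ===== PORT B =====
-- inner loop of B: running strip max m, break as soon as m ≥ values[i] (= vi)
def altInner (values : List Int) (vi : Int) (m : Int) (js : List Int) (total : Int) : Int :=
  match js with
  | [] => total
  | j :: rest =>
      if vi ≤ m then total        -- Python: if m >= values[i]: break
      else
        altInner values vi (max m (PySem.List.pyGetD values j 0)) rest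
          (if m < PySem.List.pyGetD values j 0 then total + 1 else total)

def totalPairs_alt (n : Int) (values : List Int) : Int :=
  let size : Int := (values.length : Int)
  (PySem.List.pyRange 0 (size - 1) 1).foldl (fun total i =>
    altInner values (PySem.List.pyGetD values i 0) (PySem.List.pyGetD values (i + 1) 0)
      (PySem.List.pyRange (i + 2) size 1) (total + 1)) 0

-- ===== PRECONDITION & SPEC =====
-- On the empty list A returns -1 (it adds len(values)-1 = -1 to a zero pair count), an
-- impossible pair count; B returns the intended 0.
def D_totalPairs (n : Int) (values : List Int) : Prop := values = []
instance (n : Int) (values : List Int) : Decidable (D_totalPairs n values) := by unfold D_totalPairs; infer_instance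
def Spec_totalPairs (n : Int) (values : List Int) (out : Int) : Prop := ¬ D_totalPairs n values → out = totalPairs_alt n values
instance (n : Int) (values : List Int) (out : Int) : Decidable (Spec_totalPairs n values out) := by unfold Spec_totalPairs; infer_instance
def pvDiffWitness_totalPairs : Int × List Int := (0, [])
def pvDiffWitnessOut_totalPairs : Int × Int := (-1, 0)

-- ===== CLAIM (what is proved, stated in full; the proofs are below) =====
def Claim_unchanged_totalPairs : Prop := ∀ (n : Int) (values : List Int), Dom_totalPairs n values → Spec_totalPairs n values (totalPairs n values)
def Claim_changed_totalPairs : Prop := Dom_totalPairs (pvDiffWitness_totalPairs.1) (pvDiffWitness_totalPairs.2) ∧ D_totalPairs (pvDiffWitness_totalPairs.1) (pvDiffWitness_totalPairs.2) ∧ totalPairs (pvDiffWitness_totalPairs.1) (pvDiffWitness_totalPairs.2) = pvDiffWitnessOut_totalPairs.1 ∧ totalPairs_alt (pvDiffWitness_totalPairs.1) (pvDiffWitness_totalPairs.2) = pvDiffWitnessOut_totalPairs.2 ∧ pvDiffWitnessOut_totalPairs.1 ≠ pvDiffWitnessOut_totalPairs.2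
def Claim_exact_totalPairs : Prop := ∀ (n : Int) (values : List Int), Dom_totalPairs n values → D_totalPairs n values → totalPairs n values ≠ totalPairs_alt n values

-- ===== LEMMAS AND PROOFS =====

def specCount (a m : Int) (t : List Int) : Int :=
  match t with
  | [] => 0
  | x :: r => (if m < a ∧ m < x then 1 else 0) + specCount a (max m x) r

def fA (vs : List Int) (a b : Int) (k : Int) : Int :=
  match PySem.List.max? (PySem.List.slice vs (some b) (some k)) (fun y => y) with
  | some m => if m < a ∧ m < PySem.List.pyGetD vs k 0 then 1 else 0
  | none => 0

def mval (vs : List Int) (b j : Int) : Int :=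
  match PySem.List.slice vs (some b) (some j) with
  | x :: r => r.foldl max x
  | [] => 0

theorem slice_ne_nil (vs : List Int) (b j : Int) (hb : 0 ≤ b) (hbj : b < j)
    (hbl : b.toNat < vs.length) : PySem.List.slice vs (some b) (some j) ≠ [] := by
  rw [PySem.List.slice_toNat vs hb (by omega)]
  intro h
  have := congrArg List.length h
  simp at this
  omega

theorem slice_singleton (vs : List Int) (b : Int) (hb : 0 ≤ b) (hbl : b.toNat < vs.length) :
    PySem.List.slice vs (some b) (some (b + 1)) = [vs[b.toNat]] := by
  rw [PySem.List.slice_toNat vs hb (by omega)]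
  have h1 : (b + 1).toNat - b.toNat = 1 := by omega
  rw [h1, List.drop_eq_getElem_cons hbl]
  rfl

theorem slice_append (vs : List Int) (b j : Int) (hb : 0 ≤ b) (hbj : b < j)
    (hjl : j.toNat < vs.length) :
    PySem.List.slice vs (some b) (some (j + 1))
      = PySem.List.slice vs (some b) (some j) ++ [vs[j.toNat]] := by
  rw [PySem.List.slice_toNat vs hb (by omega), PySem.List.slice_toNat vs hb (by omega)]
  have h1 : (j + 1).toNat - b.toNat = (j.toNat - b.toNat) + 1 := by omega
  rw [h1, List.take_add_one]
  congr 1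
  have hlt : j.toNat - b.toNat < (vs.drop b.toNat).length := by simp; omega
  rw [List.getElem?_eq_getElem hlt]
  simp
  congr 1
  omega

theorem mval_singleton (vs : List Int) (b : Int) (hb : 0 ≤ b) (hbl : b.toNat < vs.length) :
    mval vs b (b + 1) = vs[b.toNat] := by
  rw [mval, slice_singleton vs b hb hbl]
  simp

theorem mval_step (vs : List Int) (b j : Int) (hb : 0 ≤ b) (hbj : b < j)
    (hbl : b.toNat < vs.length) (hjl : j.toNat < vs.length) :
    mval vs b (j + 1) = max (mval vs b j) vs[j.toNat] := by
  rw [mval, slice_append vs b j hb hbj hjl, mval]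
  cases hs : PySem.List.slice vs (some b) (some j) with
  | nil => exact absurd hs (slice_ne_nil vs b j hb hbj hbl)
  | cons x r => simp [List.foldl_append]

theorem fA_eval (vs : List Int) (a b k : Int) (hb : 0 ≤ b) (hbk : b < k)
    (hbl : b.toNat < vs.length) (hkl : k.toNat < vs.length) :
    fA vs a b k = if mval vs b k < a ∧ mval vs b k < vs[k.toNat] then 1 else 0 := by
  rw [fA, mval]
  cases hs : PySem.List.slice vs (some b) (some k) with
  | nil => exact absurd hs (slice_ne_nil vs b k hb hbk hbl)
  | cons x r =>
    rw [PySem.List.max?_id_cons]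
    have hget : PySem.List.pyGetD vs k 0 = vs[k.toNat] :=
      PySem.List.pyGetD_eq_getElem (xs := vs) (i := k) (d := 0) (by omega) (by omega)
    rw [hget]

theorem key_sum (vs : List Int) (a b : Int) (hb : 0 ≤ b) (hbl : b.toNat < vs.length) :
    ∀ (cnt : Nat) (j : Int), b < j →
    j + cnt = (vs.length : Int) →
    ((PySem.List.pyRange j (vs.length : Int) 1).map (fA vs a b)).sum
      = specCount a (mval vs b j) (vs.drop j.toNat) := by
  intro cnt
  induction cnt with
  | zero =>
    intro j hbj hlen
    rw [PySem.List.pyRange_one_eq_nil (by omega), List.drop_of_length_le (by omega)]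
    simp [specCount]
  | succ cnt ih =>
    intro j hbj hlen
    have hjl : j.toNat < vs.length := by omega
    rw [PySem.List.pyRange_one_cons (by omega), List.drop_eq_getElem_cons hjl]
    rw [List.map_cons, List.sum_cons]
    rw [ih (j + 1) (by omega) (by omega)]
    have hsucc : (j + 1).toNat = j.toNat + 1 := by omega
    rw [hsucc, fA_eval vs a b j hb hbj hbl hjl, mval_step vs b j hb hbj hbl hjl]
    simp [specCount]

theorem specCount_zero (a : Int) : ∀ (t : List Int) (m : Int), a ≤ m → specCount a m t = 0 := by
  intro t
  induction t with
  | nil => intro m _; simp [specCount]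
  | cons x r ih =>
    intro m h
    have h1 : ¬ (m < a) := by omega
    simp [specCount, h1, ih (max m x) (le_trans h (le_max_left _ _))]

theorem altInner_shift (vs : List Int) (a : Int) : ∀ (js : List Int) (m t : Int),
    altInner vs a m js t = t + altInner vs a m js 0 := by
  intro js
  induction js with
  | nil => intro m t; simp [altInner]
  | cons j rest ih =>
    intro m t
    simp only [altInner]
    split_ifs with h1 h2
    · omega
    · rw [ih _ (t+1), ih _ (0+1)]; omega
    · rw [ih _ t, ih _ 0]

theorem altInner_spec (vs : List Int) (a : Int) : ∀ (cnt : Nat) (j m : Int), 0 ≤ j →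
    j + cnt = (vs.length : Int) →
    altInner vs a m (PySem.List.pyRange j (vs.length : Int) 1) 0 = specCount a m (vs.drop j.toNat) := by
  intro cnt
  induction cnt with
  | zero =>
    intro j m hj hlen
    rw [PySem.List.pyRange_one_eq_nil (by omega)]
    rw [List.drop_of_length_le (by omega)]
    simp [altInner, specCount]
  | succ cnt ih =>
    intro j m hj hlen
    have hjl : j.toNat < vs.length := by omega
    rw [PySem.List.pyRange_one_cons (by omega)]
    rw [List.drop_eq_getElem_cons hjl]
    have hget : PySem.List.pyGetD vs j 0 = vs[j.toNat] :=
      PySem.List.pyGetD_eq_getElem (xs := vs) (i := j) (d := 0) hj (by omega)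
    have hsucc : (j + 1).toNat = j.toNat + 1 := by omega
    by_cases h1 : a ≤ m
    · simp only [altInner, specCount, hget, if_pos h1]
      rw [if_neg (fun h => absurd h.1 (by omega)),
        specCount_zero a _ _ (le_trans h1 (le_max_left _ _))]
      omega
    · have hma : m < a := by omega
      simp only [altInner, specCount, hget, if_neg h1]
      rw [altInner_shift, ih (j+1) _ (by omega) (by omega), hsucc]
      by_cases hx : m < vs[j.toNat]
      · rw [if_pos hx, if_pos ⟨hma, hx⟩]; omega
      · rw [if_neg hx, if_neg (fun h => hx h.2)]

def gS (vs : List Int) (i : Int) : Int :=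
  specCount (PySem.List.pyGetD vs i 0) (PySem.List.pyGetD vs (i + 1) 0) (vs.drop (i + 2).toNat)

theorem A_eval (n : Int) (vs : List Int) :
    totalPairs n vs
      = ((PySem.List.pyRange 0 ((vs.length : Int) - 1) 1).map (gS vs)).sum
        + ((vs.length : Int) - 1) := by
  simp only [totalPairs]
  congr 1
  rw [PySem.List.foldl_congr_mem _ _ (fun acc i => acc + gS vs i) 0 ?_]
  · rw [PySem.List.foldl_add]
    simp
  · intro acc i hi
    rw [PySem.List.mem_pyRange_one] at hi
    -- inner loop body is "acc2 + fA vs a (i+1) k"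
    rw [PySem.List.foldl_congr_mem _ _
      (fun acc2 k => acc2 + fA vs (PySem.List.pyGetD vs i 0) (i + 1) k) acc ?_]
    · rw [PySem.List.foldl_add]
      have e2 : (vs.length : Int) - 1 + 1 = (vs.length : Int) := by ring
      rw [PySem.List.pyRange_neg_one_eq_reverse, e2, List.map_reverse, List.sum_reverse]
      have e1 : i + 1 + 1 = i + 2 := by ring
      rw [e1]
      have hcast : ((i + 2) + (((vs.length : Int) - (i + 2)).toNat : Int)) = (vs.length : Int) := by omega
      rw [key_sum vs (PySem.List.pyGetD vs i 0) (i + 1) (by omega) (by omega) _ (i + 2) (by omega) hcast]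
      have e3 : i + 1 + 1 = i + 2 := by ring
      simp only [gS]
      rw [← e3, mval_singleton vs (i + 1) (by omega) (by omega)]
      rw [PySem.List.pyGetD_eq_getElem (xs := vs) (i := i + 1) (d := 0) (by omega) (by omega)]
    · intro acc2 k _
      cases hM : PySem.List.max? (PySem.List.slice vs (some (i + 1)) (some k)) (fun y => y) with
      | some m => simp only [fA, hM]; split_ifs <;> omega
      | none => simp only [fA, hM]; omega

theorem B_eval (n : Int) (vs : List Int) :
    totalPairs_alt n vs
      = ((PySem.List.pyRange 0 ((vs.length : Int) - 1) 1).map (fun i => 1 + gS vs i)).sum := by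
  simp only [totalPairs_alt]
  rw [PySem.List.foldl_congr_mem _ _ (fun total i => total + (1 + gS vs i)) 0 ?_]
  · rw [PySem.List.foldl_add]
    simp
  · intro total i hi
    rw [PySem.List.mem_pyRange_one] at hi
    rw [altInner_shift]
    have hcast : ((i + 2) + (((vs.length : Int) - (i + 2)).toNat : Int)) = (vs.length : Int) := by omega
    rw [altInner_spec vs (PySem.List.pyGetD vs i 0) _ (i + 2) _ (by omega) hcast]
    simp only [gS]
    ring

theorem main_eq (n : Int) (vs : List Int) (hvs : vs ≠ []) : totalPairs n vs = totalPairs_alt n vs := by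
  rw [A_eval, B_eval]
  have hL : 1 ≤ (vs.length : Int) := by
    have := List.length_pos_of_ne_nil hvs
    omega
  rw [PySem.List.sum_map_add_int, PySem.List.sum_map_const_int, PySem.List.length_pyRange_one]
  omega

-- ===== VERDICT (by name: the statement is the Claim_ definition above) =====
theorem totalPairs_spec : Claim_unchanged_totalPairs := by
  intro n values _
  unfold Spec_totalPairs D_totalPairs
  intro hD
  exact main_eq n values hD

theorem totalPairs_changed : Claim_changed_totalPairs := by
  unfold Claim_changed_totalPairs; decide

theorem totalPairs_tight : Claim_exact_totalPairs := by
  unfold Claim_exact_totalPairs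
  intro n values _ hD
  unfold D_totalPairs at hD
  subst hD
  norm_num [totalPairs, totalPairs_alt, PySem.List.pyRange_one_eq_nil]
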